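-- pv_equiv track=rewrite | github.com/vbellv/Algorithm | 프로그래머스/0/181855. 문자열 묶기/문자열 묶기.py | solution
-- ===== SOURCE A (Python) =====
-- def solution(strArr):
--     count_of_word = dict.fromkeys(list(set([len(word) for word in strArr])), 0)
--     count = float('-inf')
--     answer = 0
--
--     for word in strArr:
--         count_of_word[len(word)] += 1
--
--     for key, value in count_of_word.items():
--         if value >= count:
--             count = value
--             answer = value
--
--     return answer
-- ===== SOURCE B (Python) =====
-- def solution(strArr):
--     ls = sorted(len(w) for w in strArr)
--     best = 0
--     run = 0
--     prev = None
--     for x in ls: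
--         if x == prev:
--             run += 1
--         else:
--             run = 1
--             prev = x
--         if run > best:
--             best = run
--     return best
-- ===== Notes on version B (the rewrite author's own statement) =====
-- stated objective: alternative
-- what changed: Replaces A's dict-of-counts (fromkeys over the length set, an increment pass, then an items scan with a -inf sentinel) by sorting the word lengths and taking the longest run of equal consecutive values in one scan.
import Mathlib
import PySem

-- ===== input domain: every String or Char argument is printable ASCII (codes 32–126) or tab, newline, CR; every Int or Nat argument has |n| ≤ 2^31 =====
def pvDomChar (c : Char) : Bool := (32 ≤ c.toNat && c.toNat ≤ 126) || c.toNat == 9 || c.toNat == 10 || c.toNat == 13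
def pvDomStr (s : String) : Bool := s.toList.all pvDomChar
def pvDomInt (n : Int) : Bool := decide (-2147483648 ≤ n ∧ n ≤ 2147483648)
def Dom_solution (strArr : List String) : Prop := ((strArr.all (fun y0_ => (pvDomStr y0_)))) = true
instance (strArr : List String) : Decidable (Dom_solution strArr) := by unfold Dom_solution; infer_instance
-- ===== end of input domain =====

-- B replaces A's dict-of-counts plus items scan by sorting the word lengths and
-- scanning for the longest run of equal consecutive values (a different traversal).


-- ===== PORT A =====
-- Literal port of A. Python's float('-inf') sentinel for `count` is modeled as
-- `none : Option Int` (exact: the sentinel is only ever compared via `value >= count`,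
-- which is always true at -inf). The dict's iteration order is consumed only by a
-- running-maximum update, whose result is order-independent.
def solution (strArr : List String) : Int :=
  let keys : PySem.Set Int := PySem.Set.ofList (strArr.map (fun word => PySem.Str.len word))
  -- dict.fromkeys(list(set(...)), 0)
  let countOfWord : PySem.Dict Int Int := keys.foldl (fun d k => d.insert k 0) PySem.Dict.empty
  -- for word in strArr: count_of_word[len(word)] += 1   (key always present)
  let counted := strArr.foldl (fun d word => d.modify (PySem.Str.len word) 0 (fun x => x + 1)) countOfWord
  -- for key, value in count_of_word.items(): if value >= count: count = value; answer = value
  let st := counted.items.foldl (fun (st : Option Int × Int) kv =>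
      match st.1 with
      | none => (some kv.2, kv.2)
      | some c => if kv.2 ≥ c then (some kv.2, kv.2) else st) (none, (0 : Int))
  st.2

-- ===== PORT B =====
-- Port of B: sort the lengths, then one scan with state (best, run, prev);
-- Python's `prev = None` start is `none`, and `x == prev` is `some x = prev`
-- (exact: an int never equals None).
def solution_alt (strArr : List String) : Int :=
  let ls := PySem.List.sorted (strArr.map (fun w => PySem.Str.len w)) (fun x => x) false
  let st := ls.foldl (fun (st : Int × Int × Option Int) x =>
      let run : Int := if some x = st.2.2 then st.2.1 + 1 else 1
      let prev : Option Int := if some x = st.2.2 then st.2.2 else some x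
      ((if run > st.1 then run else st.1), run, prev)) ((0 : Int), (0 : Int), (none : Option Int))
  st.1

-- ===== PRECONDITION & SPEC =====
def Spec_solution (strArr : List String) (out : Int) : Prop := out = solution_alt strArr
instance (strArr : List String) (out : Int) : Decidable (Spec_solution strArr out) := by unfold Spec_solution; infer_instance

-- ===== CLAIM (what is proved, stated in full; the proofs are below) =====
def Claim_equal_solution : Prop := ∀ (strArr : List String), Dom_solution strArr → Spec_solution strArr (solution strArr)

-- ===== LEMMAS AND PROOFS =====

-- the running max over the multiset of per-element occurrence counts of P
def runMax (P : List Int) : Int := (P.map (fun v => ((P.count v : Nat) : Int))).foldl max 0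

-- a running max over two lists with the same members is the same
theorem foldl_max_eq_of_mem_iff (xs ys : List Int) (h : ∀ v, v ∈ xs ↔ v ∈ ys) (a : Int) :
    xs.foldl max a = ys.foldl max a := by
  apply le_antisymm
  · rcases PySem.List.foldl_max_mem xs a with h1 | h1
    · rw [h1]; exact (PySem.List.le_foldl_max ys a).1
    · exact (PySem.List.le_foldl_max ys a).2 _ ((h _).1 h1)
  · rcases PySem.List.foldl_max_mem ys a with h1 | h1
    · rw [h1]; exact (PySem.List.le_foldl_max xs a).1
    · exact (PySem.List.le_foldl_max xs a).2 _ ((h _).2 h1)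

-- a running max is dominated by a running max over a pointwise-dominating list
theorem foldl_max_le_of_forall (xs ys : List Int) (a : Int)
    (h : ∀ v ∈ xs, ∃ w ∈ ys, v ≤ w) : xs.foldl max a ≤ ys.foldl max a := by
  rcases PySem.List.foldl_max_mem xs a with h1 | h1
  · rw [h1]; exact (PySem.List.le_foldl_max ys a).1
  · rcases h _ h1 with ⟨w, hw, hvw⟩
    exact le_trans hvw ((PySem.List.le_foldl_max ys a).2 w hw)

-- appending one element to P lifts runMax by the appended element's new count
theorem runMax_append (R : List Int) (p : Int) :
    runMax (R ++ [p]) = max (runMax R) (((R ++ [p]).count p : Nat) : Int) := by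
  have hY : max (runMax R) (((R ++ [p]).count p : Nat) : Int)
      = (R.map (fun v => ((R.count v : Nat) : Int)) ++ [(((R ++ [p]).count p : Nat) : Int)]).foldl max 0 := by
    rw [List.foldl_append]; rfl
  rw [hY]
  unfold runMax
  apply le_antisymm
  · apply foldl_max_le_of_forall
    intro v hv
    rcases List.mem_map.1 hv with ⟨u, hu, rfl⟩
    by_cases hup : u = p
    · subst hup
      exact ⟨_, List.mem_append_right _ (List.mem_singleton_self _), le_refl _⟩
    · refine ⟨((R.count u : Nat) : Int), List.mem_append_left _ ?_, ?_⟩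
      · rcases List.mem_append.1 hu with h' | h'
        · exact List.mem_map.2 ⟨u, h', rfl⟩
        · exact absurd (List.mem_singleton.1 h') hup
      · have hpu : ¬ p = u := fun hc => hup hc.symm
        have : (R ++ [p]).count u = R.count u := by
          rw [List.count_append]
          simp [hpu]
        rw [this]
  · apply foldl_max_le_of_forall
    intro w hw
    rcases List.mem_append.1 hw with h' | h'
    · rcases List.mem_map.1 h' with ⟨u, hu, rfl⟩
      refine ⟨(((R ++ [p]).count u : Nat) : Int),
        List.mem_map.2 ⟨u, List.mem_append_left _ hu, rfl⟩, ?_⟩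
      have : R.count u ≤ (R ++ [p]).count u := by
        rw [List.count_append]; omega
      exact_mod_cast this
    · rw [List.mem_singleton.1 h']
      exact ⟨_, List.mem_map.2 ⟨p, List.mem_append_right _ (List.mem_singleton_self _), rfl⟩,
        le_refl _⟩

-- B's scan on a nonempty sorted list: best = runMax, run = count of the last value, prev = it
theorem scan_sorted_concat (P : List Int) (p : Int)
    (h : (P ++ [p]).Pairwise (· ≤ ·)) :
    (P ++ [p]).foldl (fun (st : Int × Int × Option Int) x =>
        let run : Int := if some x = st.2.2 then st.2.1 + 1 else 1
        let prev : Option Int := if some x = st.2.2 then st.2.2 else some x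
        ((if run > st.1 then run else st.1), run, prev)) ((0 : Int), (0 : Int), (none : Option Int))
      = (runMax (P ++ [p]), (((P ++ [p]).count p : Nat) : Int), some p) := by
  induction P using List.reverseRecOn generalizing p with
  | nil => simp [runMax]
  | append_singleton Q q ih =>
      have hQq : (Q ++ [q]).Pairwise (· ≤ ·) := h.sublist (List.sublist_append_left _ _)
      have hle : ∀ a ∈ Q ++ [q], a ≤ p := by
        intro a ha
        exact (List.pairwise_append.1 h).2.2 a ha p (List.mem_singleton_self _)
      rw [List.foldl_append, ih q hQq]
      by_cases hpq : p = q
      · subst hpq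
        have hcnt : ((Q ++ [p]) ++ [p]).count p = (Q ++ [p]).count p + 1 := by
          rw [List.count_append]; simp
        have hrm : runMax ((Q ++ [p]) ++ [p])
            = max (runMax (Q ++ [p])) ((((Q ++ [p]).count p : Nat) : Int) + 1) := by
          rw [runMax_append, hcnt]; push_cast; ring_nf
        simp only [List.foldl_cons, List.foldl_nil]
        rw [hrm, hcnt]
        by_cases hgt : (((Q ++ [p]).count p : Nat) : Int) + 1 > runMax (Q ++ [p]) <;>
          simp [hgt, max_def] <;> omega
      · have hnm : p ∉ Q ++ [q] := by
          intro hmem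
          rcases List.mem_append.1 hmem with h' | h'
          · have h1 : p ≤ q := (List.pairwise_append.1 hQq).2.2 p h' q (List.mem_singleton_self _)
            have h2 : q ≤ p := hle q (List.mem_append_right _ (List.mem_singleton_self _))
            exact hpq (le_antisymm h1 h2)
          · exact hpq (List.mem_singleton.1 h')
        have hcnt : ((Q ++ [q]) ++ [p]).count p = 1 := by
          rw [List.count_append]
          rw [List.count_eq_zero.2 hnm]
          simp
        have hrm : runMax ((Q ++ [q]) ++ [p]) = max (runMax (Q ++ [q])) 1 := by
          rw [runMax_append, hcnt]; rfl
        have hne : some p ≠ some q := fun hc => hpq (Option.some.inj hc)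
        simp only [List.foldl_cons, List.foldl_nil, if_neg hne]
        rw [hrm, hcnt]
        have h0 : (0:Int) ≤ runMax (Q ++ [q]) := (PySem.List.le_foldl_max _ 0).1
        by_cases hgt : (1:Int) > runMax (Q ++ [q]) <;> simp [hgt, max_def] <;> omega

-- fromkeys(…, 0): every value of the seeded dict is 0
theorem getD_fromkeys_zero (ks : List Int) (d : PySem.Dict Int Int)
    (hd : ∀ k, d.getD k 0 = 0) (k : Int) :
    (ks.foldl (fun d k => d.insert k 0) d).getD k 0 = 0 := by
  induction ks generalizing d with
  | nil => exact hd k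
  | cons x t ih =>
      simp only [List.foldl_cons]
      exact ih _ (fun k' => by rw [PySem.Dict.getD_insert]; split <;> simp [hd])

-- updating a set with elements it already has leaves it unchanged
theorem set_update_eq_self (l : List Int) (s : PySem.Set Int) (h : ∀ x ∈ l, x ∈ s) :
    PySem.Set.update s l = s := by
  induction l generalizing s with
  | nil => rfl
  | cons x t ih =>
      have hx : PySem.Set.add s x = s := by
        simp [PySem.Set.add, PySem.Set.contains, h x (by simp)]
      simp only [PySem.Set.update, List.foldl_cons] at *
      rw [hx]
      exact ih s (fun y hy => h y (by simp [hy]))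

-- a dict with distinct keys is its keys paired with their values
theorem items_eq_keys_map (d : PySem.Dict Int Int) (h : d.keys.Nodup) :
    d.items = d.keys.map (fun k => (k, d.getD k 0)) := by
  have hk : d.keys = d.items.map Prod.fst := by simp [PySem.Dict.keys]
  rw [hk, List.map_map]
  symm
  calc d.items.map ((fun k => (k, d.getD k 0)) ∘ Prod.fst)
      = d.items.map id := by
        apply List.map_congr_left
        intro p hp
        have : d.getD p.1 0 = p.2 :=
          PySem.Dict.getD_of_mem_items d (by simpa using hp) h 0
        simp [Function.comp, this]
    _ = d.items := List.map_id _

-- A's items loop, started after the first item, is a running max of the values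
theorem foldA_some (ps : List (Int × Int)) (m : Int) :
    ps.foldl (fun (st : Option Int × Int) kv =>
      match st.1 with
      | none => (some kv.2, kv.2)
      | some c => if kv.2 ≥ c then (some kv.2, kv.2) else st) (some m, m)
    = (some ((ps.map Prod.snd).foldl max m), (ps.map Prod.snd).foldl max m) := by
  induction ps generalizing m with
  | nil => rfl
  | cons p t ih =>
      simp only [List.foldl_cons, List.map_cons]
      have : (if p.2 ≥ m then ((some p.2 : Option Int), p.2) else (some m, m))
          = (some (max m p.2), max m p.2) := by
        by_cases h : p.2 ≥ m <;> simp [max_def, h]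
      rw [this, ih]

-- ===== VERDICT (by name: the statement is the Claim_ definition above) =====
theorem solution_spec : Claim_equal_solution := by
  intro strArr _
  unfold Spec_solution solution solution_alt
  dsimp only
  set L := strArr.map (fun w => PySem.Str.len w) with hL
  set K := PySem.Set.ofList L with hK
  set cf : Int → Int := fun k => (List.count k L : Int) with hcf
  set S := PySem.List.sorted L (fun x => x) false with hS
  have hperm : S.Perm L := PySem.List.sorted_perm L (fun x => x) false
  have hpair : S.Pairwise (· ≤ ·) := PySem.List.sorted_pairwise L (fun x => x)
  -- the seeded dict
  set d0 : PySem.Dict Int Int := K.foldl (fun d k => d.insert k 0) PySem.Dict.empty with hd0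
  have hd0getD : ∀ k, d0.getD k 0 = 0 :=
    getD_fromkeys_zero K PySem.Dict.empty (fun k => by simp [pysem])
  have hd0keys : d0.keys = K := by
    rw [hd0, PySem.Dict.keys_foldl_insert]
    have : (PySem.Dict.empty : PySem.Dict Int Int).keys = [] := by simp [pysem]
    rw [this]
    show PySem.Set.update ([] : PySem.Set Int) K = K
    rw [show PySem.Set.update ([] : PySem.Set Int) K = PySem.Set.ofList K from rfl,
      hK, PySem.Set.ofList_ofList]
  -- the counted dict
  set d : PySem.Dict Int Int :=
    strArr.foldl (fun d word => d.modify (PySem.Str.len word) 0 (fun x => x + 1)) d0 with hd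
  have hdL : d = L.foldl (fun d x => d.modify x 0 (fun v => v + 1)) d0 := by
    rw [hd, hL, List.foldl_map]
  have hdgetD : ∀ k, d.getD k 0 = cf k := by
    intro k
    rw [hdL, PySem.Dict.getD_foldl_modify_add_one, hd0getD]
    simp [hcf]
  have hdkeys : d.keys = K := by
    rw [hdL, PySem.Dict.keys_foldl_modify, hd0keys]
    exact set_update_eq_self L K (fun x hx => (PySem.Set.mem_ofList L x).2 hx)
  have hnodup : d.keys.Nodup := by rw [hdkeys, hK]; exact PySem.Set.nodup_ofList L
  have hitems : d.items = K.map (fun k => (k, cf k)) := by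
    rw [items_eq_keys_map d hnodup, hdkeys]
    exact List.map_congr_left (fun k _ => by rw [hdgetD])
  rw [hitems]
  rcases S.eq_nil_or_concat with hSc | ⟨P, p, hSc⟩
  all_goals (try rw [List.concat_eq_append] at hSc)
  · -- empty input: the sorted length list is empty, hence L = [] and K = []
    have hLnil : L = [] := by
      have h' := hperm
      rw [hSc] at h'
      exact h'.symm.eq_nil
    have hKnil : K = [] := by rw [hK, hLnil]; rfl
    rw [hKnil, hSc]
    rfl
  · -- nonempty input
    rw [hSc, scan_sorted_concat P p (by rw [← hSc]; exact hpair)]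
    -- K is nonempty since p ∈ S = P ++ [p] gives p ∈ L
    have hpL : p ∈ L := hperm.mem_iff.1 (by rw [hSc]; exact List.mem_append_right _ (List.mem_singleton_self _))
    cases hKc : K with
    | nil =>
        exact absurd ((PySem.Set.mem_ofList L p).2 hpL) (by rw [← hK, hKc]; simp)
    | cons k0 K' =>
        simp only [List.map_cons, List.foldl_cons]
        rw [foldA_some]
        simp only [List.map_map]
        have hcomp : Prod.snd ∘ (fun k => (k, cf k)) = cf := rfl
        rw [hcomp]
        -- A's value is the running max of cf over K, started at 0
        have hA : (K'.map cf).foldl max (cf k0) = ((k0 :: K').map cf).foldl max 0 := by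
          simp only [List.map_cons, List.foldl_cons]
          have : max 0 (cf k0) = cf k0 := by
            have : (0:Int) ≤ cf k0 := by simp [hcf]
            omega
          rw [this]
        rw [hA]
        -- runMax (P ++ [p]) = running max of cf over S = over K
        have hSmap : (P ++ [p]).map (fun v => (((P ++ [p]).count v : Nat) : Int))
            = (P ++ [p]).map cf := by
          apply List.map_congr_left
          intro v _
          have : (P ++ [p]).count v = L.count v := by
            rw [← hSc]; exact hperm.count_eq v
          rw [this]
        rw [show runMax (P ++ [p]) = ((P ++ [p]).map cf).foldl max 0 by rw [runMax, hSmap]]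
        apply foldl_max_eq_of_mem_iff
        intro v
        constructor
        · rintro hv
          rcases List.mem_map.1 hv with ⟨x, hx, rfl⟩
          refine List.mem_map.2 ⟨x, ?_, rfl⟩
          have hxL : x ∈ L := (PySem.Set.mem_ofList L x).1 (by rw [← hK, hKc]; exact hx)
          rw [← hSc]
          exact hperm.mem_iff.2 hxL
        · rintro hv
          rcases List.mem_map.1 hv with ⟨x, hx, rfl⟩
          refine List.mem_map.2 ⟨x, ?_, rfl⟩
          have hxL : x ∈ L := hperm.mem_iff.1 (by rw [hSc]; exact hx)
          rw [← hKc, hK]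
          exact (PySem.Set.mem_ofList L x).2 hxL
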